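-- pv_equiv track=rewrite | github.com/jangchangwan/TIL | docs/03_baekjoon/implementation/4659_비밀번호 발음하기.py | IsTriple
-- ===== SOURCE A (Python) =====
-- vowels = ['a', 'e', 'i', 'o', 'u']
--
-- def IsTriple(password):
--     vowels_count = 0
--     novowels_count = 0
--
--     for word in password:
--         if word in vowels:
--             vowels_count += 1
--             novowels_count = 0
--         else:
--             vowels_count = 0
--             novowels_count += 1
--
--         if vowels_count >= 3 or novowels_count >= 3:
--             return False
--     return True
-- ===== SOURCE B (Python) =====
-- def IsTriple(password):
--     cls = [c in 'aeiou' for c in password]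
--     return not any(x == y == z for x, y, z in zip(cls, cls[1:], cls[2:]))
-- ===== Notes on version B (the rewrite author's own statement) =====
-- stated objective: idiomatic
-- what changed: B classifies each character once and rejects iff any sliding window of three consecutive classes is constant, instead of A's two reset-on-switch counters with an early return.
import Mathlib
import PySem

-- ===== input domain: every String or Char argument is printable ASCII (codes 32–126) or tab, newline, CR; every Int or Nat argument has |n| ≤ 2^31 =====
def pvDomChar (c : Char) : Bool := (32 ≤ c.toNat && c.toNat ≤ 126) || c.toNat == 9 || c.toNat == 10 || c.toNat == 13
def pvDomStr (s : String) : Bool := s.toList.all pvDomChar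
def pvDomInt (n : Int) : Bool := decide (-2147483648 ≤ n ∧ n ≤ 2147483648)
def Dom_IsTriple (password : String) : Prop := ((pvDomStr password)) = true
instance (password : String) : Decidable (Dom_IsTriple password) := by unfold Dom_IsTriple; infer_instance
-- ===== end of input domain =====

-- B replaces A's two reset-on-switch counters by classifying each character as vowel/consonant
-- and rejecting iff some window of three consecutive classes is constant (idiomatic, same cost).


-- ===== PORT A =====
-- vowels = ['a', 'e', 'i', 'o', 'u']
def vowelsA : List Char := ['a', 'e', 'i', 'o', 'u']

-- the for-loop of A, carrying the two counters; returning false = A's early 'return False'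
def IsTripleLoop : List Char → Int → Int → Bool
  | [], _, _ => true
  | word :: rest, vowels_count, novowels_count =>
    let vowels_count' := if vowelsA.contains word then vowels_count + 1 else 0
    let novowels_count' := if vowelsA.contains word then 0 else novowels_count + 1
    if vowels_count' ≥ 3 ∨ novowels_count' ≥ 3 then false
    else IsTripleLoop rest vowels_count' novowels_count'

def IsTriple (password : String) : Bool :=
  IsTripleLoop password.toList 0 0

-- ===== PORT B =====
-- c in 'aeiou'
def isVowelB (c : Char) : Bool := "aeiou".toList.contains c

-- Source B: cls = [c in 'aeiou' for c in password]
--       not any(x == y == z for x,y,z in zip(cls, cls[1:], cls[2:]))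
-- zip of three lists rendered as nested zip of pairs; cls[1:]/cls[2:] are the nonnegative
-- slices, exactly List.drop 1 / List.drop 2 here.
def IsTriple_alt (password : String) : Bool :=
  let cls := password.toList.map isVowelB
  !(((cls.zip (cls.drop 1)).zip (cls.drop 2)).any (fun p => p.1.1 == p.1.2 && p.1.2 == p.2))

-- ===== PRECONDITION & SPEC =====
def Spec_IsTriple (password : String) (out : Bool) : Prop := out = IsTriple_alt password
instance (password : String) (out : Bool) : Decidable (Spec_IsTriple password out) := by unfold Spec_IsTriple; infer_instance

-- ===== CLAIM (what is proved, stated in full; the proofs are below) =====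
def Claim_equal_IsTriple : Prop := ∀ (password : String), Dom_IsTriple password → Spec_IsTriple password (IsTriple password)

-- ===== LEMMAS AND PROOFS =====

-- 'no constant window of three' as a direct recursion over the class list
def noTrip : List Bool → Bool
  | x :: y :: z :: r => !(x == y && y == z) && noTrip (y :: z :: r)
  | _ => true

theorem isVowel_eq (c : Char) : vowelsA.contains c = isVowelB c := rfl

-- A's loop depends on the characters only through their vowel class
def loopC : List Bool → Int → Int → Bool
  | [], _, _ => true
  | b :: rest, vc, nc =>
    let vc' := if b then vc + 1 else 0
    let nc' := if b then 0 else nc + 1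
    if vc' ≥ 3 ∨ nc' ≥ 3 then false else loopC rest vc' nc'

theorem loop_eq_loopC (cs : List Char) (vc nc : Int) :
    IsTripleLoop cs vc nc = loopC (cs.map isVowelB) vc nc := by
  induction cs generalizing vc nc with
  | nil => rfl
  | cons c rest ih =>
    simp only [IsTripleLoop, List.map, loopC, isVowel_eq]
    split_ifs <;> simp [ih]

theorem noTrip_cons_ne (x y : Bool) (l : List Bool) (h : x ≠ y) :
    noTrip (x :: y :: l) = noTrip (y :: l) := by
  cases l with
  | nil => rfl
  | cons z r => simp [noTrip, h]

-- B's zip-window formula computes noTrip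
theorem zip_noTrip : ∀ l : List Bool,
    (!(((l.zip (l.drop 1)).zip (l.drop 2)).any (fun p => p.1.1 == p.1.2 && p.1.2 == p.2)))
      = noTrip l
  | [] => rfl
  | [_] => rfl
  | [_, _] => rfl
  | x :: y :: z :: r => by
    have ih := zip_noTrip (y :: z :: r)
    simp only [List.drop, List.zip_cons_cons, List.any_cons, noTrip] at *
    rw [← ih]
    cases x == y && y == z <;> simp

-- the counter state behaves like a pending run of k characters of class c
theorem noTrip_cons3 (x y z : Bool) (r : List Bool) :
    noTrip (x :: y :: z :: r) = (!(x == y && y == z) && noTrip (y :: z :: r)) := rfl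

theorem loopC_pad (bs : List Bool) : ∀ (c : Bool) (k : Nat), k ≤ 2 →
    loopC bs (if c then (k : Int) else 0) (if c then 0 else (k : Int)) =
      noTrip (List.replicate k c ++ bs) := by
  induction bs with
  | nil => intro c k hk; cases c <;> interval_cases k <;> simp [loopC, noTrip, List.replicate]
  | cons b rest ih =>
    intro c k hk
    have ihT1 := ih true 1 (by omega)
    have ihT2 := ih true 2 (by omega)
    have ihF1 := ih false 1 (by omega)
    have ihF2 := ih false 2 (by omega)
    simp only [if_pos, if_neg, List.replicate, List.cons_append, List.nil_append,
      Nat.cast_one, Nat.cast_ofNat, Bool.false_eq_true, not_false_iff]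
      at ihT1 ihT2 ihF1 ihF2
    cases b
    · cases c
      · interval_cases k
        · simp only [loopC, List.replicate, List.nil_append]
          norm_num
          exact ihF1
        · simp only [loopC, List.replicate, List.cons_append, List.nil_append]
          norm_num
          exact ihF2
        · simp only [loopC, List.replicate, List.cons_append, List.nil_append, noTrip_cons3]
          norm_num [noTrip_cons3]
      · interval_cases k
        · simp only [loopC, List.replicate, List.nil_append]
          norm_num
          exact ihF1
        · simp only [loopC, List.replicate, List.cons_append, List.nil_append]
          norm_num
          rw [noTrip_cons_ne true false rest (by decide)]
          exact ihF1
        · simp only [loopC, List.replicate, List.cons_append, List.nil_append]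
          norm_num
          rw [noTrip_cons3, noTrip_cons_ne true false rest (by decide)]
          simpa using ihF1
    · cases c
      · interval_cases k
        · simp only [loopC, List.replicate, List.nil_append]
          norm_num
          exact ihT1
        · simp only [loopC, List.replicate, List.cons_append, List.nil_append]
          norm_num
          rw [noTrip_cons_ne false true rest (by decide)]
          exact ihT1
        · simp only [loopC, List.replicate, List.cons_append, List.nil_append]
          norm_num
          rw [noTrip_cons3, noTrip_cons_ne false true rest (by decide)]
          simpa using ihT1
      · interval_cases k
        · simp only [loopC, List.replicate, List.nil_append]
          norm_num
          exact ihT1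
        · simp only [loopC, List.replicate, List.cons_append, List.nil_append]
          norm_num
          exact ihT2
        · simp only [loopC, List.replicate, List.cons_append, List.nil_append, noTrip_cons3]
          norm_num [noTrip_cons3]

-- ===== VERDICT (by name: the statement is the Claim_ definition above) =====
theorem IsTriple_spec : Claim_equal_IsTriple := by
  intro password _
  unfold Spec_IsTriple IsTriple IsTriple_alt
  rw [loop_eq_loopC]
  have := loopC_pad (password.toList.map isVowelB) true 0 (by omega)
  simp only [List.replicate, List.nil_append, Nat.cast_zero, ite_true] at this
  rw [this, zip_noTrip]
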